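-- pv_equiv track=rewrite | github.com/KNU-HAEDAL/2024-SS-small-group-ALSol | SWKIM/51to60/51.py | dfs
-- ===== SOURCE A (Python) =====
-- def dfs(info_1, info_2, target, start, cnt, distance):
--     # 활을 모두 다 쐈을 경우
--     if cnt == 0:
--         score_1 = 0
--         score_2 = 0
--
--         # 어피치와 라이언의 점수 계산
--         for i in range(11):
--             if info_1[i] < info_2[i]:
--                 score_2 += 10 - i
--             elif info_1[i] > info_2[i]:
--                 score_1 += 10 - i
--             elif info_1[i] == info_2[i] and info_1[i] != 0:
--                 score_1 += 10 - i
--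
--         # 라이언의 점수가 어피치보다 더 높을 경우
--         # 두 선수의 점수 차를 계산하여 점수 차가 최대인 경우 반환
--         if score_2 > score_1:
--             temp = score_2 - score_1
--
--             if temp > distance: # 점수 차가 기존보다 더 큰 경우
--                 target = info_2.copy()
--                 distance = temp
--             elif temp == distance:  # 점수 차가 같은 경우
--                 # 가장 낮은 점수를 맞힌 갯수를 기준으로 반환
--                 for i in range(10, -1, -1):
--                     if info_2[i] > target[i]:
--                         target = info_2.copy()
--                         break
--                     elif info_2[i] < target[i]:
--                         break
--
--         # 점수 차가 최대인 경우의 과녁 정보와 점수 차 반환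
--         return target, distance
--     # 활을 덜 쏜 경우
--     else:
--         for i in range(start, 11):
--             # 0점 과녁을 조준하고 남은 활 수가 남은 경우
--             # 남은 활을 모두 0점 과녁에 쏜다.
--             if i == 10 and cnt > 0:
--                 info_2[i] = cnt
--                 target, distance = dfs(info_1, info_2, target, i+1, 0, distance)
--                 info_2[i] = 0
--             # 남을 활 수가 어피치가 쏜 i점의 활 수보다 큰 경우
--             elif cnt > info_1[i]:
--                 info_2[i] = info_1[i] + 1   # 어피치보다 한발 더 많이 맞춘다.
--                 target, distance = dfs(info_1, info_2, target, i+1, cnt - info_2[i], distance)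
--                 info_2[i] = 0
--     return target, distance
-- ===== SOURCE B (Python) =====
-- # B: iterative explicit-stack backtracking (set/undo ops on one work list) instead of
-- # A's recursion; leaf scoring via comprehensions and the tie-break via one lexicographic
-- # list comparison.  Return-value equivalence: A zeroes entries of the caller's info_2 in
-- # place; B never mutates its arguments.
--
-- def _best(info_1, info_2, target, distance):
--     score_2 = sum(10 - i for i in range(11) if info_2[i] > info_1[i])
--     score_1 = sum(10 - i for i in range(11)
--                   if info_1[i] > info_2[i] or (info_1[i] == info_2[i] and info_1[i] != 0))
--     if score_2 > score_1:
--         temp = score_2 - score_1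
--         if temp > distance:
--             return info_2.copy(), temp
--         if temp == distance and info_2[:11][::-1] > target[:11][::-1]:
--             return info_2.copy(), distance
--     return target, distance
--
-- def dfs(info_1, info_2, target, start, cnt, distance):
--     w = list(info_2)
--     ops = [("node", start, cnt)]
--     while ops:
--         op = ops.pop()
--         if op[0] == "node":
--             _, s, c = op
--             if c == 0:
--                 target, distance = _best(info_1, w, target, distance)
--             else:
--                 todo = []
--                 for i in range(s, 11):
--                     if i == 10 and c > 0:
--                         todo += [("set", i, c), ("node", i + 1, 0), ("set", i, 0)]
--                     elif c > info_1[i]: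
--                         v = info_1[i] + 1
--                         todo += [("set", i, v), ("node", i + 1, c - v), ("set", i, 0)]
--                 ops.extend(reversed(todo))
--         else:
--             w[op[1]] = op[2]
--     return target, distance
-- ===== Notes on version B (the rewrite author's own statement) =====
-- stated objective: alternative
-- what changed: A's recursive backtracking DFS is replaced by an iterative explicit-stack machine that replays set/undo operations on a single work list; the leaf scoring loop becomes two comprehension sums and the index-10-down tie-break loop becomes one lexicographic comparison of reversed 11-prefixes.
-- outside the precondition, e.g. on dfs([0, 0, 0, 0, 0, 0, 0, 0, 0, 0, 0], [], [], 0, -1, -1): A returns ([], -1), B returns ([], -1)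
import Mathlib
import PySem

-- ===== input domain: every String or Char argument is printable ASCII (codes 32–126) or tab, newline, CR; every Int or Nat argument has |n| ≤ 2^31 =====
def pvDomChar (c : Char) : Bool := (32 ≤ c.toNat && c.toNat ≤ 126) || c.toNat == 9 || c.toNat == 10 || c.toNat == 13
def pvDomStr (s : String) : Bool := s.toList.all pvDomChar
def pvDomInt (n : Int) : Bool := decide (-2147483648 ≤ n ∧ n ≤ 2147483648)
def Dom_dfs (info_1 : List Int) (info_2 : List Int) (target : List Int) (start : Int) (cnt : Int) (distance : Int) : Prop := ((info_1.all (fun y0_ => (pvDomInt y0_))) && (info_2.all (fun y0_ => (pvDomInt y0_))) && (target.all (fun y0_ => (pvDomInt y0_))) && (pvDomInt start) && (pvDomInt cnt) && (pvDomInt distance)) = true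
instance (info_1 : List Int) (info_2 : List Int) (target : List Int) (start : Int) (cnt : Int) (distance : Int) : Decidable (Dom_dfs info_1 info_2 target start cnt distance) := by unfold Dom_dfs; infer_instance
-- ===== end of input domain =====

-- B replaces A's recursive backtracking DFS by an iterative explicit-stack machine replaying
-- set/undo operations on one work list (objective: alternative decomposition, no speed claim).
-- Return-value equivalence only: Python A zeroes entries of the caller's info_2 in place; B does not mutate.


-- ===== PORT A =====
-- xs[i] (read) and xs[i] = v (write), Python negative-index semantics; exact on in-range
-- indices (out-of-range = IndexError is excluded by Pre_dfs).
def geti (xs : List Int) (i : Int) : Int := PySem.List.pyGetD xs i 0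
def seti (xs : List Int) (i : Int) (v : Int) : List Int := PySem.List.pySetD xs i v

-- A's tie-break loop `for i in range(10, -1, -1): ...` with its two breaks
def tieLoopA (info_2 target : List Int) : List Int → List Int
  | [] => target
  | i :: rest =>
    if geti info_2 i > geti target i then info_2
    else if geti info_2 i < geti target i then target
    else tieLoopA info_2 target rest

-- A's cnt == 0 leaf: score loop over range(11), then the comparison/update
def leafA (info_1 info_2 target : List Int) (distance : Int) : List Int × Int :=
  let sc := (PySem.List.pyRange 0 11 1).foldl (fun (p : Int × Int) i =>
      if geti info_1 i < geti info_2 i then (p.1, p.2 + (10 - i))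
      else if geti info_1 i > geti info_2 i then (p.1 + (10 - i), p.2)
      else if geti info_1 i = geti info_2 i ∧ geti info_1 i ≠ 0 then (p.1 + (10 - i), p.2)
      else p) (0, 0)
  if sc.2 > sc.1 then
    let temp := sc.2 - sc.1
    if temp > distance then (info_2, temp)
    else if temp = distance then (tieLoopA info_2 target (PySem.List.pyRange 10 (-1) (-1)), distance)
    else (target, distance)
  else (target, distance)

-- A's recursion; the first component threads the shared, mutated info_2 list (Python passes
-- it by reference and restores entries to 0), the rest is A's (target, distance) return value.
-- fuel = recursion depth bound; recursion depth is bounded by (12 - start), see dfs below.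
def dfsARec (info_1 : List Int) : Nat → List Int → List Int → Int → Int → Int → List Int × List Int × Int
  | 0, info_2, target, _, _, distance => (info_2, target, distance)
  | f + 1, info_2, target, start, cnt, distance =>
    if cnt = 0 then
      let r := leafA info_1 info_2 target distance
      (info_2, r.1, r.2)
    else
      (PySem.List.pyRange start 11 1).foldl (fun (st : List Int × List Int × Int) i =>
        if i = 10 ∧ cnt > 0 then
          let w1 := seti st.1 i cnt
          let r := dfsARec info_1 f w1 st.2.1 (i + 1) 0 st.2.2
          (seti r.1 i 0, r.2.1, r.2.2)
        else if cnt > geti info_1 i then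
          let w1 := seti st.1 i (geti info_1 i + 1)
          let r := dfsARec info_1 f w1 st.2.1 (i + 1) (cnt - geti w1 i) st.2.2
          (seti r.1 i 0, r.2.1, r.2.2)
        else st) (info_2, target, distance)

def dfs (info_1 : List Int) (info_2 : List Int) (target : List Int) (start : Int) (cnt : Int) (distance : Int) : List Int × Int :=
  let r := dfsARec info_1 ((12 - max start (-11)).toNat + 1) info_2 target start cnt distance
  (r.2.1, r.2.2)

-- ===== PORT B =====
-- one op of B's explicit stack: a search node, or a write w[i] = v (B's set/undo entries)
inductive BOp : Type
  | node : Int → Int → BOp     -- ("node", s, c)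
  | set  : Int → Int → BOp     -- ("set", i, v)
deriving DecidableEq, Repr

-- Python list `>` (lexicographic), exact for integer lists
def lexGt : List Int → List Int → Bool
  | x :: xs, y :: ys => if x > y then true else if x < y then false else lexGt xs ys
  | _ :: _, [] => true
  | [], _ => false

-- xs[:11][::-1]; PySem.List.slice?_none_none_neg_one: [::-1] is List.reverse
def rev11 (xs : List Int) : List Int := (PySem.List.slice xs none (some 11)).reverse

-- B's leaf: comprehension sums, then one lexicographic tie-break comparison
def leafB (info_1 info_2 target : List Int) (distance : Int) : List Int × Int :=
  let score_2 := (((PySem.List.pyRange 0 11 1).filter (fun i => decide (geti info_2 i > geti info_1 i))).map (fun i => 10 - i)).sum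
  let score_1 := (((PySem.List.pyRange 0 11 1).filter (fun i => decide (geti info_1 i > geti info_2 i ∨ (geti info_1 i = geti info_2 i ∧ geti info_1 i ≠ 0)))).map (fun i => 10 - i)).sum
  if score_2 > score_1 then
    let temp := score_2 - score_1
    if temp > distance then (info_2, temp)
    else if temp = distance ∧ lexGt (rev11 info_2) (rev11 target) then (info_2, distance)
    else (target, distance)
  else (target, distance)

-- the `todo` list a popped node (s, c) pushes (in B's push order, head popped first)
def expandB (info_1 : List Int) (s c : Int) : List BOp :=
  (PySem.List.pyRange s 11 1).foldl (fun todo i =>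
    if i = 10 ∧ c > 0 then todo ++ [BOp.set i c, BOp.node (i + 1) 0, BOp.set i 0]
    else if c > geti info_1 i then
      todo ++ [BOp.set i (geti info_1 i + 1), BOp.node (i + 1) (c - (geti info_1 i + 1)), BOp.set i 0]
    else todo) []

-- B's while loop over the op stack; state = (work list w, target, distance).
-- fuel = bound on loop iterations (the stack machine pops one op per iteration).
def runB (info_1 : List Int) : Nat → List BOp → List Int × List Int × Int → List Int × Int
  | _, [], st => (st.2.1, st.2.2)
  | 0, _ :: _, st => (st.2.1, st.2.2)
  | f + 1, op :: K, st =>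
    match op with
    | BOp.set i v => runB info_1 f K (seti st.1 i v, st.2.1, st.2.2)
    | BOp.node s c =>
      if c = 0 then runB info_1 f K (st.1, leafB info_1 st.1 st.2.1 st.2.2)
      else runB info_1 f (expandB info_1 s c ++ K) st

def dfs_alt (info_1 : List Int) (info_2 : List Int) (target : List Int) (start : Int) (cnt : Int) (distance : Int) : List Int × Int :=
  runB info_1 (3 * 2 ^ (12 - max start (-11)).toNat) [BOp.node start cnt] (info_2, target, distance)

-- ===== PRECONDITION & SPEC =====
-- Pre_ excludes inputs where some list is shorter than 11 or start < -11: there A in general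
-- raises IndexError (indices 0..10 and start..10 are accessed) or RecursionError; on the few
-- such inputs where A still returns (e.g. a cnt ≠ 0 run whose loop never fires a branch),
-- B returns the same value, but the proof does not cover them.
def Pre_dfs (info_1 : List Int) (info_2 : List Int) (target : List Int) (start : Int) (cnt : Int) (distance : Int) : Prop :=
  (11 ≤ info_1.length ∧ 11 ≤ info_2.length ∧ 11 ≤ target.length ∧ -11 ≤ start) ∨ (cnt ≠ 0 ∧ 11 ≤ start)
instance (info_1 : List Int) (info_2 : List Int) (target : List Int) (start : Int) (cnt : Int) (distance : Int) : Decidable (Pre_dfs info_1 info_2 target start cnt distance) := by unfold Pre_dfs; infer_instance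

def pvWitness_dfs : List Int × List Int × List Int × Int × Int × Int :=
  ([0,0,0,0,0,0,0,0,0,0,0], [0,0,0,0,0,0,0,0,0,0,0], [0,0,0,0,0,0,0,0,0,0,0], 0, 1, 0)

def Spec_dfs (info_1 : List Int) (info_2 : List Int) (target : List Int) (start : Int) (cnt : Int) (distance : Int) (out : List Int × Int) : Prop := out = dfs_alt info_1 info_2 target start cnt distance
instance (info_1 : List Int) (info_2 : List Int) (target : List Int) (start : Int) (cnt : Int) (distance : Int) (out : List Int × Int) : Decidable (Spec_dfs info_1 info_2 target start cnt distance out) := by unfold Spec_dfs; infer_instance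

-- ===== CLAIM (what is proved, stated in full; the proofs are below) =====
def Claim_equal_dfs : Prop := ∀ (info_1 : List Int) (info_2 : List Int) (target : List Int) (start : Int) (cnt : Int) (distance : Int), Dom_dfs info_1 info_2 target start cnt distance → Pre_dfs info_1 info_2 target start cnt distance → Spec_dfs info_1 info_2 target start cnt distance (dfs info_1 info_2 target start cnt distance)

-- ===== LEMMAS AND PROOFS =====

-- cost measure on ops: an upper bound on the number of machine iterations an op triggers
def muS (s : Int) : Nat := 3 * 2 ^ (11 - s).toNat - 2
def muOp : BOp → Nat
  | BOp.node s _ => muS s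
  | BOp.set _ _ => 1
def muK (K : List BOp) : Nat := (K.map muOp).sum

theorem length_seti (xs : List Int) (i v : Int) : (seti xs i v).length = xs.length :=
  PySem.List.length_pySetD xs i v

theorem geti_seti_same (xs : List Int) (i v : Int) (h1 : -(xs.length : Int) ≤ i) (h2 : i < xs.length) :
    geti (seti xs i v) i = v := by
  unfold geti seti PySem.List.pyGetD PySem.List.pySetD PySem.List.pySet? PySem.List.pyGet? PySem.List.pyIdx?
  by_cases h0 : 0 ≤ i
  · have hk : i.toNat < xs.length := by omega
    simp [h0, h2, hk]
  · have hk : xs.length - (-i).toNat < xs.length := by omega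
    simp [h0, h1, hk]

theorem muK_append (A B : List BOp) : muK (A ++ B) = muK A + muK B := by
  simp [muK]

theorem muK_cons (op : BOp) (K : List BOp) : muK (op :: K) = muOp op + muK K := by
  simp [muK]

theorem muK_flatMap (g : Int → List BOp) (l : List Int) :
    muK (l.flatMap g) = (l.map (fun i => muK (g i))).sum := by
  induction l with
  | nil => simp [muK]
  | cons x l ih => simp [List.flatMap_cons, muK_append, ih]

theorem one_le_muS (s : Int) : 1 ≤ muS s := by
  have : (1:Nat) ≤ 2 ^ (11 - s).toNat := Nat.one_le_two_pow
  simp [muS]; omega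

theorem muS_succ_lt (s i : Int) (hs : s ≤ i) (hi : i < 11) : muS (i + 1) < muS s := by
  have h1 : (11 - (i+1)).toNat < (11 - s).toNat := by omega
  have h2 : 2 ^ (11 - (i+1)).toNat < 2 ^ (11 - s).toNat := Nat.pow_lt_pow_right (by norm_num) h1
  have h3 : (1:Nat) ≤ 2 ^ (11 - (i+1)).toNat := Nat.one_le_two_pow
  simp [muS]; omega

-- expandB as a flatMap
def gOpB (info_1 : List Int) (c : Int) (i : Int) : List BOp :=
  if i = 10 ∧ c > 0 then [BOp.set i c, BOp.node (i + 1) 0, BOp.set i 0]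
  else if c > geti info_1 i then [BOp.set i (geti info_1 i + 1), BOp.node (i + 1) (c - (geti info_1 i + 1)), BOp.set i 0]
  else []

theorem expandB_eq (info_1 : List Int) (s c : Int) :
    expandB info_1 s c = (PySem.List.pyRange s 11 1).flatMap (gOpB info_1 c) := by
  unfold expandB
  rw [PySem.List.foldl_congr_mem _ _ (fun todo i => todo ++ gOpB info_1 c i) []
    (by intro acc x _
        by_cases h1 : x = 10 ∧ c > 0 <;> by_cases h2 : c > geti info_1 x <;>
          simp [gOpB, h1, h2])]
  simpa using PySem.List.foldl_append_eq_flatMap (gOpB info_1 c) (PySem.List.pyRange s 11 1) []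

theorem muK_gOpB (info_1 : List Int) (c i : Int) : muK (gOpB info_1 c i) ≤ 2 + muS (i + 1) := by
  unfold gOpB; split_ifs <;> simp [muK, muOp] <;> omega

theorem rangecost (k : Nat) : ∀ s : Int, (11 - s).toNat = k →
    ((PySem.List.pyRange s 11 1).map (fun i => 2 + muS (i + 1))).sum = muS s - 1 := by
  induction k with
  | zero =>
    intro s hs
    rw [PySem.List.pyRange_one_eq_nil (by omega)]
    simp [muS, hs]
  | succ k ih =>
    intro s hs
    rw [PySem.List.pyRange_one_cons (by omega)]
    simp only [List.map_cons, List.sum_cons]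
    rw [ih (s + 1) (by omega)]
    have h2 : (1:Nat) ≤ 2 ^ (11 - (s+1)).toNat := Nat.one_le_two_pow
    have h3 : (11 - s).toNat = (11 - (s+1)).toNat + 1 := by omega
    have h4 : muS s = 2 * muS (s + 1) + 2 := by
      simp only [muS, h3, pow_succ]; omega
    have h5 := one_le_muS (s + 1)
    omega

theorem muK_expandB (info_1 : List Int) (s c : Int) : muK (expandB info_1 s c) + 1 ≤ muS s := by
  rw [expandB_eq, muK_flatMap]
  have h1 : ((PySem.List.pyRange s 11 1).map (fun i => muK (gOpB info_1 c i))).sum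
      ≤ ((PySem.List.pyRange s 11 1).map (fun i => 2 + muS (i + 1))).sum :=
    List.sum_le_sum (fun i _ => muK_gOpB info_1 c i)
  have h2 := rangecost (11 - s).toNat s rfl
  have h3 := one_le_muS s
  omega

-- fuel irrelevance of the stack machine beyond the cost of the stack
theorem runB_fuel_irrel (info_1 : List Int) : ∀ n : Nat, ∀ (K : List BOp) (st : List Int × List Int × Int) (f1 f2 : Nat),
    muK K ≤ n → n ≤ f1 → n ≤ f2 → runB info_1 f1 K st = runB info_1 f2 K st := by
  intro n
  induction n using Nat.strong_induction_on with
  | _ n ih =>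
    intro K st f1 f2 hK h1 h2
    match K with
    | [] => cases f1 <;> cases f2 <;> rfl
    | op :: K' =>
      have hop : 1 ≤ muOp op := by
        cases op with
        | node s c => exact one_le_muS s
        | set i v => exact le_refl 1
      have hmu : muK (op :: K') = muOp op + muK K' := by simp [muK]
      obtain ⟨g1, rfl⟩ : ∃ g1, f1 = g1 + 1 := ⟨f1 - 1, by omega⟩
      obtain ⟨g2, rfl⟩ : ∃ g2, f2 = g2 + 1 := ⟨f2 - 1, by omega⟩
      have hK' : muK K' ≤ n - 1 := by omega
      cases op with
      | set i v =>
        simp only [runB]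
        exact ih (n - 1) (by omega) K' _ g1 g2 hK' (by omega) (by omega)
      | node s c =>
        simp only [runB]
        by_cases hc : c = 0
        · rw [if_pos hc, if_pos hc]
          exact ih (n - 1) (by omega) K' _ g1 g2 hK' (by omega) (by omega)
        · rw [if_neg hc, if_neg hc]
          have hexp := muK_expandB info_1 s c
          have hmuop : muOp (BOp.node s c) = muS s := rfl
          have : muK (expandB info_1 s c ++ K') ≤ n - 1 := by
            rw [muK_append]; omega
          exact ih (n - 1) (by omega) _ _ g1 g2 this (by omega) (by omega)

-- scores: A's two-accumulator fold equals B's two comprehension sums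
theorem score_fold (info_1 info_2 : List Int) (l : List Int) (s1 s2 : Int) :
    l.foldl (fun (p : Int × Int) i =>
      if geti info_1 i < geti info_2 i then (p.1, p.2 + (10 - i))
      else if geti info_1 i > geti info_2 i then (p.1 + (10 - i), p.2)
      else if geti info_1 i = geti info_2 i ∧ geti info_1 i ≠ 0 then (p.1 + (10 - i), p.2)
      else p) (s1, s2)
    = (s1 + ((l.filter (fun i => decide (geti info_1 i > geti info_2 i ∨ (geti info_1 i = geti info_2 i ∧ geti info_1 i ≠ 0)))).map (fun i => 10 - i)).sum,
       s2 + ((l.filter (fun i => decide (geti info_2 i > geti info_1 i))).map (fun i => 10 - i)).sum) := by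
  induction l generalizing s1 s2 with
  | nil => simp
  | cons x l ih =>
    simp only [List.foldl_cons, List.filter_cons]
    by_cases h1 : geti info_1 x < geti info_2 x
    · have : ¬ (geti info_1 x > geti info_2 x ∨ (geti info_1 x = geti info_2 x ∧ geti info_1 x ≠ 0)) := by omega
      simp [h1, this, ih]; omega
    · by_cases h2 : geti info_1 x > geti info_2 x
      · have hno : ¬ geti info_2 x > geti info_1 x := by omega
        have hne : ¬ (geti info_1 x = geti info_2 x) := by omega
        have hyes : geti info_1 x > geti info_2 x ∨ (geti info_1 x = geti info_2 x ∧ geti info_1 x ≠ 0) := Or.inl h2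
        simp [h1, h2, hno, hne, hyes, ih]; omega
      · by_cases h3 : geti info_1 x = geti info_2 x ∧ geti info_1 x ≠ 0
        · obtain ⟨heq, hne⟩ := h3
          have hno : ¬ geti info_2 x > geti info_1 x := by omega
          have hyes : geti info_1 x > geti info_2 x ∨ (geti info_1 x = geti info_2 x ∧ geti info_1 x ≠ 0) :=
            Or.inr ⟨heq, hne⟩
          have hne2 : ¬ (geti info_2 x = 0) := heq ▸ hne
          simp [h1, h2, heq, hne2, hno, hyes, ih]; omega
        · have heq : geti info_1 x = geti info_2 x := by omega
          have hno : ¬ geti info_2 x > geti info_1 x := by omega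
          have hno2 : ¬ (geti info_1 x > geti info_2 x ∨ (geti info_1 x = geti info_2 x ∧ geti info_1 x ≠ 0)) := by
            omega
          have hz : geti info_2 x = 0 := by omega
          simp [h1, h2, heq, hz, hno, hno2, ih]
  
-- A's countdown tie-break loop is a lexicographic comparison of the mapped index lists
theorem tie_lex (info_2 target : List Int) : ∀ idxs : List Int,
    tieLoopA info_2 target idxs =
      (if lexGt (idxs.map (geti info_2)) (idxs.map (geti target)) then info_2 else target) := by
  intro idxs
  induction idxs with
  | nil => simp [tieLoopA, lexGt]
  | cons i rest ih =>
    simp only [tieLoopA, List.map_cons, lexGt]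
    by_cases h1 : geti info_2 i > geti target i
    · simp [h1]
    · by_cases h2 : geti info_2 i < geti target i
      · simp [h1, h2]
      · simp [h1, h2, ih]

theorem map_countdown_rev11 (xs : List Int) (h : 11 ≤ xs.length) :
    (PySem.List.pyRange 10 (-1) (-1)).map (geti xs) = rev11 xs := by
  have h1 : rev11 xs = (xs.take 11).reverse := by
    unfold rev11
    rw [PySem.List.slice_to xs (by norm_num)]
    have : ((11:Int).toNat) = 11 := rfl
    simp [this]
  have h2 : (PySem.List.pyRange 0 11 1).map (geti xs) = xs.take 11 := by
    apply List.ext_getElem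
    · simp [PySem.List.length_pyRange_one]
      omega
    · intro k hk1 hk2
      have hk : k < 11 := by simpa [PySem.List.length_pyRange_one] using hk1
      have hkx : k < xs.length := by omega
      simp [PySem.List.getElem_pyRange_one, geti, PySem.List.pyGetD_natCast, List.getD_eq_getElem?_getD,
        List.getElem?_eq_getElem hkx]
  rw [h1, ← h2, PySem.List.pyRange_neg_one_eq_reverse]
  norm_num

theorem leaf_eq (info_1 info_2 target : List Int) (distance : Int)
    (h2 : 11 ≤ info_2.length) (h3 : 11 ≤ target.length) :
    leafA info_1 info_2 target distance = leafB info_1 info_2 target distance := by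
  unfold leafA leafB
  rw [score_fold info_1 info_2 (PySem.List.pyRange 0 11 1) 0 0]
  rw [tie_lex info_2 target (PySem.List.pyRange 10 (-1) (-1)),
      map_countdown_rev11 info_2 h2, map_countdown_rev11 target h3]
  simp only [zero_add]
  split_ifs with g1 g2 g3 g4 g5 <;> simp_all

-- leafA's target output is one of the two input lists
theorem tieLoopA_cases (info_2 target : List Int) (idxs : List Int) :
    tieLoopA info_2 target idxs = info_2 ∨ tieLoopA info_2 target idxs = target := by
  induction idxs with
  | nil => right; rfl
  | cons i rest ih =>
    simp only [tieLoopA]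
    split_ifs <;> simp [ih]

theorem leafA_fst_cases (info_1 info_2 target : List Int) (distance : Int) :
    (leafA info_1 info_2 target distance).1 = info_2 ∨ (leafA info_1 info_2 target distance).1 = target := by
  unfold leafA
  simp only []
  split_ifs <;> simp [tieLoopA_cases]

-- lengths through A's recursion
theorem dfsARec_lengths (info_1 : List Int) : ∀ (f : Nat) (w tg : List Int) (s c d : Int),
    11 ≤ w.length → 11 ≤ tg.length →
    (dfsARec info_1 f w tg s c d).1.length = w.length ∧ 11 ≤ (dfsARec info_1 f w tg s c d).2.1.length := by
  intro f
  induction f with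
  | zero => intro w tg s c d hw htg; exact ⟨rfl, htg⟩
  | succ f ih =>
    intro w tg s c d hw htg
    simp only [dfsARec]
    by_cases hc : c = 0
    · rw [if_pos hc]
      refine ⟨rfl, ?_⟩
      rcases leafA_fst_cases info_1 w tg d with h | h <;> simp [h, hw, htg]
    · rw [if_neg hc]
      have inner : ∀ (l : List Int) (st : List Int × List Int × Int),
          st.1.length = w.length → 11 ≤ st.2.1.length →
          ((l.foldl (fun (st : List Int × List Int × Int) i =>
            if i = 10 ∧ c > 0 then
              let w1 := seti st.1 i c
              let r := dfsARec info_1 f w1 st.2.1 (i + 1) 0 st.2.2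
              (seti r.1 i 0, r.2.1, r.2.2)
            else if c > geti info_1 i then
              let w1 := seti st.1 i (geti info_1 i + 1)
              let r := dfsARec info_1 f w1 st.2.1 (i + 1) (c - geti w1 i) st.2.2
              (seti r.1 i 0, r.2.1, r.2.2)
            else st) st).1.length = w.length ∧
           11 ≤ (l.foldl (fun (st : List Int × List Int × Int) i =>
            if i = 10 ∧ c > 0 then
              let w1 := seti st.1 i c
              let r := dfsARec info_1 f w1 st.2.1 (i + 1) 0 st.2.2
              (seti r.1 i 0, r.2.1, r.2.2)
            else if c > geti info_1 i then
              let w1 := seti st.1 i (geti info_1 i + 1)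
              let r := dfsARec info_1 f w1 st.2.1 (i + 1) (c - geti w1 i) st.2.2
              (seti r.1 i 0, r.2.1, r.2.2)
            else st) st).2.1.length) := by
        intro l
        induction l with
        | nil => intro st h1 h2; exact ⟨h1, h2⟩
        | cons i l ihl =>
          intro st h1 h2
          simp only [List.foldl_cons]
          apply ihl
          · split_ifs with hA hB
            · have := ih (seti st.1 i c) st.2.1 (i + 1) 0 st.2.2 (by rw [length_seti]; omega) h2
              simp only [length_seti] at this ⊢
              omega
            · have := ih (seti st.1 i (geti info_1 i + 1)) st.2.1 (i + 1)
                (c - geti (seti st.1 i (geti info_1 i + 1)) i) st.2.2 (by rw [length_seti]; omega) h2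
              simp only [length_seti] at this ⊢
              omega
            · exact h1
          · split_ifs with hA hB
            · exact (ih (seti st.1 i c) st.2.1 (i + 1) 0 st.2.2 (by rw [length_seti]; omega) h2).2
            · exact (ih (seti st.1 i (geti info_1 i + 1)) st.2.1 (i + 1)
                (c - geti (seti st.1 i (geti info_1 i + 1)) i) st.2.2 (by rw [length_seti]; omega) h2).2
            · exact h2
      exact inner (PySem.List.pyRange s 11 1) (w, tg, d) rfl htg

-- fuel irrelevance of A's recursion beyond its depth bound
theorem dfsARec_fuel_irrel (info_1 : List Int) : ∀ n : Nat, ∀ (f1 f2 : Nat) (w tg : List Int) (s c d : Int),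
    (12 - s).toNat + 1 ≤ n → (12 - s).toNat + 1 ≤ f1 → (12 - s).toNat + 1 ≤ f2 →
    dfsARec info_1 f1 w tg s c d = dfsARec info_1 f2 w tg s c d := by
  intro n
  induction n using Nat.strong_induction_on with
  | _ n ih =>
    intro f1 f2 w tg s c d hn h1 h2
    obtain ⟨g1, rfl⟩ : ∃ g1, f1 = g1 + 1 := ⟨f1 - 1, by omega⟩
    obtain ⟨g2, rfl⟩ : ∃ g2, f2 = g2 + 1 := ⟨f2 - 1, by omega⟩
    simp only [dfsARec]
    by_cases hc : c = 0
    · simp only [if_pos hc]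
    · simp only [if_neg hc]
      refine PySem.List.foldl_congr_mem _ _ _ _ ?_
      intro st i hi
      have hmem := (PySem.List.mem_pyRange_one).1 hi
      have hfuel : (12 - (i + 1)).toNat + 1 ≤ n - 1 := by omega
      have hrec1 := ih (n - 1) (by omega) g1 g2 (seti st.1 i c) st.2.1 (i + 1) 0 st.2.2
        hfuel (by omega) (by omega)
      have hrec2 := ih (n - 1) (by omega) g1 g2 (seti st.1 i (geti info_1 i + 1)) st.2.1 (i + 1)
        (c - geti (seti st.1 i (geti info_1 i + 1)) i) st.2.2 hfuel (by omega) (by omega)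
      split_ifs <;> simp [hrec1, hrec2]

-- the central simulation: popping a node runs A's recursion on the machine state
theorem amach (info_1 : List Int) : ∀ n : Nat, ∀ (s c : Int) (w tg : List Int) (d : Int) (K : List BOp) (f g : Nat),
    -11 ≤ s → 11 ≤ w.length → 11 ≤ tg.length →
    muS s ≤ n → muS s + muK K ≤ f → muK K ≤ g →
    runB info_1 f (BOp.node s c :: K) (w, tg, d) =
      runB info_1 g K (dfsARec info_1 ((12 - s).toNat + 1) w tg s c d) := by
  intro n
  induction n using Nat.strong_induction_on with
  | _ n ih =>
    intro s c w tg d K f g hs hw htg hn hf hg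
    have hms := one_le_muS s
    obtain ⟨f', rfl⟩ : ∃ f', f = f' + 1 := ⟨f - 1, by omega⟩
    simp only [runB, dfsARec]
    by_cases hc : c = 0
    · simp only [if_pos hc]
      rw [leaf_eq info_1 w tg d hw htg]
      rw [runB_fuel_irrel info_1 (muK K) K _ f' g (le_refl _) (by omega) hg]
    · simp only [if_neg hc]
      rw [expandB_eq]
      have hcost := muK_expandB info_1 s c
      rw [expandB_eq, muK_flatMap] at hcost
      have main : ∀ (l : List Int), (∀ i ∈ l, s ≤ i ∧ i < 11) →
          ∀ (w' tg' : List Int) (d' : Int) (f'' : Nat),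
          11 ≤ w'.length → 11 ≤ tg'.length →
          muK (l.flatMap (gOpB info_1 c)) + muK K ≤ f'' →
          runB info_1 f'' (l.flatMap (gOpB info_1 c) ++ K) (w', tg', d') =
            runB info_1 g K (l.foldl (fun (st : List Int × List Int × Int) i =>
              if i = 10 ∧ c > 0 then
                let w1 := seti st.1 i c
                let r := dfsARec info_1 (12 - s).toNat w1 st.2.1 (i + 1) 0 st.2.2
                (seti r.1 i 0, r.2.1, r.2.2)
              else if c > geti info_1 i then
                let w1 := seti st.1 i (geti info_1 i + 1)
                let r := dfsARec info_1 (12 - s).toNat w1 st.2.1 (i + 1) (c - geti w1 i) st.2.2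
                (seti r.1 i 0, r.2.1, r.2.2)
              else st) (w', tg', d')) := by
        intro l
        induction l with
        | nil =>
          intro _ w' tg' d' f'' hw' htg' hfu
          simp only [List.flatMap_nil, List.nil_append, List.foldl_nil]
          have h0 : muK ([] : List BOp) = 0 := rfl
          simp only [List.flatMap_nil, h0] at hfu
          exact runB_fuel_irrel info_1 (muK K) K _ f'' g (le_refl _) (by omega) hg
        | cons i l ihl =>
          intro hmem w' tg' d' f'' hw' htg' hfu
          obtain ⟨hsi, hi11⟩ := hmem i List.mem_cons_self
          have hmem' : ∀ j ∈ l, s ≤ j ∧ j < 11 := fun j hj => hmem j (List.mem_cons_of_mem _ hj)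
          have hs' : -11 ≤ i + 1 := by omega
          have hlt : muS (i + 1) < n := lt_of_lt_of_le (muS_succ_lt s i hsi hi11) hn
          have hms' := one_le_muS (i + 1)
          by_cases hA : i = 10 ∧ c > 0
          · have hg1 : gOpB info_1 c i = [BOp.set i c, BOp.node (i + 1) 0, BOp.set i 0] := by
              simp [gOpB, hA]
            have hmg : muK (gOpB info_1 c i) = 2 + muS (i + 1) := by
              rw [hg1]; simp [muK, muOp]; omega
            have hfu2 : 2 + muS (i + 1) + (muK (l.flatMap (gOpB info_1 c)) + muK K) ≤ f'' := by
              rw [List.flatMap_cons, muK_append] at hfu; omega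
            obtain ⟨f3, rfl⟩ : ∃ f3, f'' = f3 + 1 := ⟨f'' - 1, by omega⟩
            rw [List.flatMap_cons, hg1]
            simp only [List.cons_append, List.nil_append]
            simp only [runB]
            rw [ih (muS (i + 1)) hlt (i + 1) 0 (seti w' i c) tg' d'
                (BOp.set i 0 :: (l.flatMap (gOpB info_1 c) ++ K)) f3
                ((muK (l.flatMap (gOpB info_1 c)) + muK K) + 1) hs'
                (by rw [length_seti]; omega) htg' (le_refl _)
                (by rw [muK_cons, muK_append]; have : muOp (BOp.set i 0) = 1 := rfl; omega)
                (by rw [muK_cons, muK_append]; have : muOp (BOp.set i 0) = 1 := rfl; omega)]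
            simp only [runB]
            have hirr := dfsARec_fuel_irrel info_1 ((12 - (i + 1)).toNat + 1)
              ((12 - s).toNat) ((12 - (i + 1)).toNat + 1) (seti w' i c) tg' (i + 1) 0 d'
              (le_refl _) (by omega) (le_refl _)
            simp only [List.foldl_cons, if_pos hA]
            rw [hirr]
            have hlen := dfsARec_lengths info_1 ((12 - (i + 1)).toNat + 1) (seti w' i c) tg'
              (i + 1) 0 d' (by rw [length_seti]; omega) htg'
            exact ihl hmem' _ _ _ _ (by rw [length_seti, hlen.1, length_seti]; omega) hlen.2
              (by omega)
          · by_cases hB : c > geti info_1 i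
            · have hgs : geti (seti w' i (geti info_1 i + 1)) i = geti info_1 i + 1 := by
                apply geti_seti_same
                · omega
                · omega
              have hg1 : gOpB info_1 c i = [BOp.set i (geti info_1 i + 1),
                  BOp.node (i + 1) (c - (geti info_1 i + 1)), BOp.set i 0] := by
                simp [gOpB, hA, hB]
              have hmg : muK (gOpB info_1 c i) = 2 + muS (i + 1) := by
                rw [hg1]; simp [muK, muOp]; omega
              have hfu2 : 2 + muS (i + 1) + (muK (l.flatMap (gOpB info_1 c)) + muK K) ≤ f'' := by
                rw [List.flatMap_cons, muK_append] at hfu; omega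
              obtain ⟨f3, rfl⟩ : ∃ f3, f'' = f3 + 1 := ⟨f'' - 1, by omega⟩
              rw [List.flatMap_cons, hg1]
              simp only [List.cons_append, List.nil_append]
              simp only [runB]
              rw [ih (muS (i + 1)) hlt (i + 1) (c - (geti info_1 i + 1)) (seti w' i (geti info_1 i + 1)) tg' d'
                  (BOp.set i 0 :: (l.flatMap (gOpB info_1 c) ++ K)) f3
                  ((muK (l.flatMap (gOpB info_1 c)) + muK K) + 1) hs'
                  (by rw [length_seti]; omega) htg' (le_refl _)
                  (by rw [muK_cons, muK_append]; have : muOp (BOp.set i 0) = 1 := rfl; omega)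
                  (by rw [muK_cons, muK_append]; have : muOp (BOp.set i 0) = 1 := rfl; omega)]
              simp only [runB]
              have hirr := dfsARec_fuel_irrel info_1 ((12 - (i + 1)).toNat + 1)
                ((12 - s).toNat) ((12 - (i + 1)).toNat + 1) (seti w' i (geti info_1 i + 1)) tg'
                (i + 1) (c - (geti info_1 i + 1)) d'
                (le_refl _) (by omega) (le_refl _)
              simp only [List.foldl_cons, if_neg hA, if_pos hB]
              rw [hgs, hirr]
              have hlen := dfsARec_lengths info_1 ((12 - (i + 1)).toNat + 1)
                (seti w' i (geti info_1 i + 1)) tg' (i + 1) (c - (geti info_1 i + 1)) d'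
                (by rw [length_seti]; omega) htg'
              exact ihl hmem' _ _ _ _ (by rw [length_seti, hlen.1, length_seti]; omega) hlen.2
                (by omega)
            · have hg1 : gOpB info_1 c i = [] := by simp [gOpB, hA, hB]
              rw [List.flatMap_cons, hg1, List.nil_append]
              simp only [List.foldl_cons, if_neg hA, if_neg hB]
              refine ihl hmem' w' tg' d' f'' hw' htg' ?_
              rw [List.flatMap_cons, hg1, List.nil_append] at hfu
              exact hfu
      refine main (PySem.List.pyRange s 11 1)
        (fun i hi => by
          have := (PySem.List.mem_pyRange_one).1 hi
          omega) w tg d f' hw htg ?_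
      have : muK ((PySem.List.pyRange s 11 1).flatMap (gOpB info_1 c)) + 1 ≤ muS s := by
        rw [muK_flatMap]; omega
      omega

-- ===== VERDICT (by name: the statement is the Claim_ definition above) =====
theorem dfs_spec : Claim_equal_dfs := by
  intro info_1 info_2 target start cnt distance _ hpre
  unfold Spec_dfs dfs dfs_alt
  rcases hpre with ⟨h1, h2, h3, h4⟩ | ⟨hc, hs⟩
  · have hmax : max start (-11) = start := by omega
    rw [hmax]
    have hpow : 2 ^ (11 - start).toNat ≤ 2 ^ (12 - start).toNat :=
      Nat.pow_le_pow_right (by norm_num) (by omega)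
    have hrun := amach info_1 (muS start) start cnt info_2 target distance []
      (3 * 2 ^ (12 - start).toNat) 0 h4 h2 h3 (le_refl _)
      (by have h0 : muK ([] : List BOp) = 0 := rfl
          have h5 : muS start = 3 * 2 ^ (11 - start).toNat - 2 := rfl
          omega)
      (by simp [muK])
    rw [hrun]
    rfl
  · have hnil : PySem.List.pyRange start 11 1 = [] := PySem.List.pyRange_one_eq_nil hs
    have hexp : expandB info_1 start cnt = [] := by
      unfold expandB; rw [hnil]; rfl
    obtain ⟨m, hm⟩ : ∃ m, 3 * 2 ^ (12 - max start (-11)).toNat = m + 1 :=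
      ⟨3 * 2 ^ (12 - max start (-11)).toNat - 1,
        by have : (1:Nat) ≤ 2 ^ (12 - max start (-11)).toNat := Nat.one_le_two_pow; omega⟩
    rw [hm]
    simp only [runB, dfsARec, if_neg hc, hnil, hexp, List.foldl_nil, List.nil_append]
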